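-- pv_equiv track=rewrite | github.com/cereal-lab/Papers | 2025-GECCO-tan-SeqDenoise_V1/ILS_Hill_Climbing/utils/config_utils.py | processedString
-- ===== SOURCE A (Python) =====
-- def processedString(str, removedChar, keep):
--
--     count = 0
--     seq = ""
--
--     for j in str:
--         if count < len(keep):
--             if j == removedChar and keep[count] == 1:
--                 count += 1
--                 seq += j
--                 continue
--
--
--         if j == removedChar:
--             count += 1
--             continue
--
--         seq += j
--
--     return seq
-- ===== SOURCE B (Python) =====
-- def processedString(str, removedChar, keep):
--     # Pass 1: indices of the occurrences of removedChar, in order.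
--     occ = [i for i, ch in enumerate(str) if ch == removedChar]
--     # Decide per occurrence number whether it is kept; collect dropped indices.
--     drop = set()
--     for i, idx in enumerate(occ):
--         if not (i < len(keep) and keep[i] == 1):
--             drop.add(idx)
--     # Pass 2: join every character whose index is not dropped.
--     return "".join(ch for i, ch in enumerate(str) if i not in drop)
-- ===== Notes on version B (the rewrite author's own statement) =====
-- stated objective: alternative
-- what changed: Replaces A's single interleaved counter loop (append/skip with a running occurrence counter) by an index-based two-pass scheme: first collect the occurrence indices of removedChar and turn the not-kept ones into a drop set, then join all characters whose index is not in the drop set.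
import Mathlib
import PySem

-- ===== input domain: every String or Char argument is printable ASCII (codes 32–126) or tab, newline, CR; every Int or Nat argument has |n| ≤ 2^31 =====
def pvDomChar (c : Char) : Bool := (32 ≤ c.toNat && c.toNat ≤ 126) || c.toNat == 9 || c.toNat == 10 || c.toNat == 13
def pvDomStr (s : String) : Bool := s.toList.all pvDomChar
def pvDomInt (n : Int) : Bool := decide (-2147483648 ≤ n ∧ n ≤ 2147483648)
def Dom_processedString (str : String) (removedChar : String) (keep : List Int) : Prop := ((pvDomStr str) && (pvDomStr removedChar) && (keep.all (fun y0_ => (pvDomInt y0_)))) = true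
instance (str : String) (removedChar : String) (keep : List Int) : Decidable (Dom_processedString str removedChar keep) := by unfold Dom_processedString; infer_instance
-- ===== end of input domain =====

-- B replaces A's interleaved skip/append counter loop by a two-pass scheme (occurrence
-- indices + drop set, then an index filter); objective: alternative (same cost).

-- ===== PORT A =====
-- literal transliteration of A's single loop: state = (count, seq)
def processedString (str : String) (removedChar : String) (keep : List Int) : String :=
  let st := str.toList.foldl (fun (st : Nat × List Char) j =>
    if st.1 < keep.length ∧ String.mk [j] = removedChar ∧ keep.getD st.1 0 = 1 then
      (st.1 + 1, st.2 ++ [j])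
    else if String.mk [j] = removedChar then
      (st.1 + 1, st.2)
    else (st.1, st.2 ++ [j])) (0, ([] : List Char))
  String.mk st.2

-- ===== PORT B =====
-- pass 1: occurrence indices of removedChar (enumerate ported as a fold carrying the index)
-- then the drop set (indices of not-kept occurrences; occurrence indices are distinct,
-- so the list of appended elements is exactly the Python set), then the index filter.
def processedString_alt (str : String) (removedChar : String) (keep : List Int) : String :=
  let occ := (str.toList.foldl (fun (st : Nat × List Nat) ch =>
      (st.1 + 1, if String.mk [ch] = removedChar then st.2 ++ [st.1] else st.2)) (0, ([] : List Nat))).2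
  let drop := (occ.foldl (fun (st : Nat × List Nat) idx =>
      (st.1 + 1, if ¬ (st.1 < keep.length ∧ keep.getD st.1 0 = 1) then st.2 ++ [idx] else st.2)) (0, ([] : List Nat))).2
  String.mk ((str.toList.foldl (fun (st : Nat × List Char) ch =>
      (st.1 + 1, if st.1 ∈ drop then st.2 else st.2 ++ [ch])) (0, ([] : List Char))).2)

-- ===== PRECONDITION & SPEC =====
def Spec_processedString (str : String) (removedChar : String) (keep : List Int) (out : String) : Prop := out = processedString_alt str removedChar keep
instance (str : String) (removedChar : String) (keep : List Int) (out : String) : Decidable (Spec_processedString str removedChar keep out) := by unfold Spec_processedString; infer_instance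

-- ===== CLAIM (what is proved, stated in full; the proofs are below) =====
def Claim_equal_processedString : Prop := ∀ (str : String) (removedChar : String) (keep : List Int), Dom_processedString str removedChar keep → Spec_processedString str removedChar keep (processedString str removedChar keep)

-- ===== LEMMAS AND PROOFS =====

-- reference function: A's loop as structural recursion
def pvG (rc : String) (keep : List Int) : Nat → List Char → List Char
  | _, [] => []
  | c, j :: l =>
    if String.mk [j] = rc then
      (if c < keep.length ∧ keep.getD c 0 = 1 then j :: pvG rc keep (c + 1) l
       else pvG rc keep (c + 1) l)
    else j :: pvG rc keep c l

-- B's three passes as structural recursions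
def pvOcc (rc : String) : Nat → List Char → List Nat
  | _, [] => []
  | i, j :: l => if String.mk [j] = rc then i :: pvOcc rc (i + 1) l else pvOcc rc (i + 1) l

def pvDrop (keep : List Int) : Nat → List Nat → List Nat
  | _, [] => []
  | c, idx :: os =>
    if ¬ (c < keep.length ∧ keep.getD c 0 = 1) then idx :: pvDrop keep (c + 1) os
    else pvDrop keep (c + 1) os

def pvFilt (D : List Nat) : Nat → List Char → List Char
  | _, [] => []
  | i, j :: l => if i ∈ D then pvFilt D (i + 1) l else j :: pvFilt D (i + 1) l

theorem foldA_eq (rc : String) (keep : List Int) (l : List Char) (c : Nat) (seq : List Char) :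
      (l.foldl (fun (st : Nat × List Char) j =>
        if st.1 < keep.length ∧ String.mk [j] = rc ∧ keep.getD st.1 0 = 1 then
          (st.1 + 1, st.2 ++ [j])
        else if String.mk [j] = rc then (st.1 + 1, st.2)
        else (st.1, st.2 ++ [j])) (c, seq)).2 = seq ++ pvG rc keep c l := by
  induction l generalizing c seq with
  | nil => simp [pvG]
  | cons j l ih =>
    simp only [List.foldl_cons]
    by_cases hm : String.mk [j] = rc
    · by_cases hk : c < keep.length ∧ keep.getD c 0 = 1
      · rw [if_pos ⟨hk.1, hm, hk.2⟩, ih, pvG, if_pos hm, if_pos hk]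
        simp
      · have h1 : ¬ (c < keep.length ∧ String.mk [j] = rc ∧ keep.getD c 0 = 1) := by
          intro h; exact hk ⟨h.1, h.2.2⟩
        rw [if_neg h1, if_pos hm, ih, pvG, if_pos hm, if_neg hk]
    · have h1 : ¬ (c < keep.length ∧ String.mk [j] = rc ∧ keep.getD c 0 = 1) := by
        intro h; exact hm h.2.1
      rw [if_neg h1, if_neg hm, ih, pvG, if_neg hm]
      simp

theorem foldOcc_eq (rc : String) (l : List Char) (i : Nat) (acc : List Nat) :
      (l.foldl (fun (st : Nat × List Nat) ch =>
        (st.1 + 1, if String.mk [ch] = rc then st.2 ++ [st.1] else st.2)) (i, acc)).2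
        = acc ++ pvOcc rc i l := by
  induction l generalizing i acc with
  | nil => simp [pvOcc]
  | cons j l ih =>
    simp only [List.foldl_cons]
    by_cases hm : String.mk [j] = rc
    · rw [if_pos hm, ih, pvOcc, if_pos hm]; simp
    · rw [if_neg hm, ih, pvOcc, if_neg hm]

theorem foldDrop_eq (keep : List Int) (os : List Nat) (c : Nat) (acc : List Nat) :
      (os.foldl (fun (st : Nat × List Nat) idx =>
        (st.1 + 1, if ¬ (st.1 < keep.length ∧ keep.getD st.1 0 = 1) then st.2 ++ [idx] else st.2))
        (c, acc)).2 = acc ++ pvDrop keep c os := by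
  induction os generalizing c acc with
  | nil => simp [pvDrop]
  | cons idx os ih =>
    simp only [List.foldl_cons]
    by_cases hk : c < keep.length ∧ keep.getD c 0 = 1
    · rw [if_neg (not_not_intro hk), ih, pvDrop, if_neg (not_not_intro hk)]
    · rw [if_pos hk, ih, pvDrop, if_pos hk]; simp

theorem foldFilt_eq (D : List Nat) (l : List Char) (i : Nat) (acc : List Char) :
      (l.foldl (fun (st : Nat × List Char) ch =>
        (st.1 + 1, if st.1 ∈ D then st.2 else st.2 ++ [ch])) (i, acc)).2
        = acc ++ pvFilt D i l := by
  induction l generalizing i acc with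
  | nil => simp [pvFilt]
  | cons j l ih =>
    simp only [List.foldl_cons]
    by_cases hm : i ∈ D
    · rw [if_pos hm, ih, pvFilt, if_pos hm]
    · rw [if_neg hm, ih, pvFilt, if_neg hm]; simp

theorem pvOcc_ge (rc : String) (l : List Char) :
    ∀ (i x : Nat), x ∈ pvOcc rc i l → i ≤ x := by
  induction l with
  | nil => intro i x h; simp [pvOcc] at h
  | cons j l ih =>
    intro i x h
    rw [pvOcc] at h
    by_cases hm : String.mk [j] = rc
    · rw [if_pos hm] at h
      rcases List.mem_cons.1 h with h | h
      · omega
      · have := ih (i + 1) x h; omega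
    · rw [if_neg hm] at h
      have := ih (i + 1) x h; omega

theorem pvDrop_subset (keep : List Int) (os : List Nat) :
    ∀ (c x : Nat), x ∈ pvDrop keep c os → x ∈ os := by
  induction os with
  | nil => intro c x h; simp [pvDrop] at h
  | cons idx os ih =>
    intro c x h
    rw [pvDrop] at h
    by_cases hk : c < keep.length ∧ keep.getD c 0 = 1
    · rw [if_neg (not_not_intro hk)] at h
      exact List.mem_cons_of_mem _ (ih _ _ h)
    · rw [if_pos hk] at h
      rcases List.mem_cons.1 h with h | h
      · simp [h]
      · exact List.mem_cons_of_mem _ (ih _ _ h)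

theorem pvFilt_eq_pvG (rc : String) (keep : List Int) (l : List Char) :
    ∀ (i c : Nat) (D : List Nat),
      (∀ x, i ≤ x → (x ∈ D ↔ x ∈ pvDrop keep c (pvOcc rc i l))) →
      pvFilt D i l = pvG rc keep c l := by
  induction l with
  | nil => intro i c D _; simp [pvFilt, pvG]
  | cons j l ih =>
    intro i c D hD
    by_cases hm : String.mk [j] = rc
    · have hocc : pvOcc rc i (j :: l) = i :: pvOcc rc (i + 1) l := by
        rw [pvOcc, if_pos hm]
      by_cases hk : c < keep.length ∧ keep.getD c 0 = 1
      · -- kept occurrence: i not dropped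
        have hdrop : pvDrop keep c (pvOcc rc i (j :: l)) = pvDrop keep (c + 1) (pvOcc rc (i + 1) l) := by
          rw [hocc, pvDrop, if_neg (not_not_intro hk)]
        have hiD : i ∉ D := by
          intro hi
          have h2 := (hD i (le_refl i)).1 hi
          rw [hdrop] at h2
          have := pvOcc_ge rc l (i + 1) i (pvDrop_subset _ _ _ _ h2)
          omega
        rw [pvFilt, if_neg hiD, pvG, if_pos hm, if_pos hk]
        congr 1
        exact ih (i + 1) (c + 1) D (fun x hx => by
          rw [← hdrop]; exact hD x (by omega))
      · -- dropped occurrence: i in D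
        have hdrop : pvDrop keep c (pvOcc rc i (j :: l)) = i :: pvDrop keep (c + 1) (pvOcc rc (i + 1) l) := by
          rw [hocc, pvDrop, if_pos hk]
        have hiD : i ∈ D := by
          rw [hD i (le_refl i), hdrop]; exact List.mem_cons_self ..
        rw [pvFilt, if_pos hiD, pvG, if_pos hm, if_neg hk]
        exact ih (i + 1) (c + 1) D (fun x hx => by
          have h2 := hD x (by omega)
          rw [hdrop] at h2
          rw [h2, List.mem_cons]
          constructor
          · rintro (h | h)
            · omega
            · exact h
          · intro h; exact Or.inr h)
    · -- non-occurrence: i not dropped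
      have hocc : pvOcc rc i (j :: l) = pvOcc rc (i + 1) l := by
        rw [pvOcc, if_neg hm]
      have hiD : i ∉ D := by
        intro hi
        have h2 := (hD i (le_refl i)).1 hi
        rw [hocc] at h2
        have := pvOcc_ge rc l (i + 1) i (pvDrop_subset _ _ _ _ h2)
        omega
      rw [pvFilt, if_neg hiD, pvG, if_neg hm]
      congr 1
      exact ih (i + 1) c D (fun x hx => by
        rw [← hocc]; exact hD x (by omega))

-- ===== VERDICT (by name: the statement is the Claim_ definition above) =====
theorem processedString_spec : Claim_equal_processedString := by
  intro str removedChar keep _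
  unfold Spec_processedString processedString processedString_alt
  simp only [foldA_eq, foldOcc_eq, foldDrop_eq, foldFilt_eq, List.nil_append]
  rw [pvFilt_eq_pvG removedChar keep str.toList 0 0 _ (fun x _ => Iff.rfl)]
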